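-- pv_equiv track=rewrite | github.com/raeez/chiral-bar-cobar | compute/lib/spectral_sequence.py | _sym_module_dim
-- ===== SOURCE A (Python) =====
-- from math import comb
--
-- def _sym_module_dim(dim_g: int, weight: int) -> int:
--     """Dimension of weight-h part of Sym(g otimes t^{-1}k[t^{-1}]).
--
--     This is the space of polynomials in generators {e_i^{(-m)} : 1<=i<=dim_g, m>=1}
--     with total weight sum(m_j) = weight.
--
--     dim = sum over partitions lambda of weight: prod_j C(dim_g + mult_j - 1, mult_j)
--     where mult_j counts how many parts equal j.
--
--     Equivalently, this is the coefficient of q^weight in prod_{m>=1} 1/(1-q^m)^{dim_g}.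
--     """
--     if weight == 0:
--         return 1
--     # Use the partition-with-colors generating function
--     # p_d(n) = coefficient of q^n in prod_{m>=1} 1/(1-q^m)^d
--     d = dim_g
--     table = [0] * (weight + 1)
--     table[0] = 1
--     for m in range(1, weight + 1):
--         # Add mode m with d colors: multiply by 1/(1-q^m)^d
--         # 1/(1-x)^d has coefficients C(k+d-1, d-1)
--         new_table = [0] * (weight + 1)
--         for w in range(weight + 1):
--             for k in range(0, (weight - w) // m + 1):
--                 new_table[w + k * m] += table[w] * comb(k + d - 1, d - 1)
--         table = new_table
--     return table[weight]
-- ===== SOURCE B (Python) =====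
-- def _sym_module_dim(dim_g: int, weight: int) -> int:
--     """Coefficient of q^weight in prod_{m>=1} 1/(1-q^m)^dim_g, via the
--     Euler-transform recurrence n*a_n = dim_g * sum_k sigma(k) * a_{n-k}
--     with a divisor-sum sieve (O(weight^2) int ops, no binomials)."""
--     if weight <= 0:
--         return 1 if weight == 0 else 0
--     w = weight
--     sigma = [0] * (w + 1)
--     for m in range(1, w + 1):
--         for j in range(m, w + 1, m):
--             sigma[j] += m
--     a = [1] + [0] * w
--     for n in range(1, w + 1):
--         s = 0
--         for k in range(1, n + 1):
--             s += sigma[k] * a[n - k]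
--         a[n] = dim_g * s // n
--     return a[w]
-- ===== Notes on version B (the rewrite author's own statement) =====
-- stated objective: faster
-- what changed: A multiplies the truncated series by 1/(1-q^m)^dim_g for every m with an inner binomial-coefficient convolution; B instead sieves divisor sums sigma(k) once and fills the coefficients by the Euler-transform recurrence n*a_n = dim_g * sum_k sigma(k)*a_{n-k}, with no binomial coefficients at all.
import Mathlib
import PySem

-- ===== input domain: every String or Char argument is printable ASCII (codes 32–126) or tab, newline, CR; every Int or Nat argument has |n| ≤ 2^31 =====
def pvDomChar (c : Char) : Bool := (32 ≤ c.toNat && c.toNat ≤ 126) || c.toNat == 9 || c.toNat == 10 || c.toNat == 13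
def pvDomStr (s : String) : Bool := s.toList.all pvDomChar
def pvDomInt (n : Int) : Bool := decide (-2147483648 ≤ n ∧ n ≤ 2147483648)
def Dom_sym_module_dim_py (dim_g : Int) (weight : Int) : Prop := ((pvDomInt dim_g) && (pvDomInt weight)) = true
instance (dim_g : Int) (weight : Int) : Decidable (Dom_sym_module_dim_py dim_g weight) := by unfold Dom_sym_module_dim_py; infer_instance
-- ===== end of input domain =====

-- B replaces per-mode binomial convolutions by the Euler-transform recurrence
-- n*a_n = dim_g * sum_k sigma(k) * a_{n-k} with a divisor-sum sieve (objective: faster).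
-- ===== PORT A =====
-- math.comb(n, k) on nonnegative arguments (all calls inside Pre_ have nonnegative arguments);
-- computed, like CPython does, by a short descending product using the symmetry C(n,k)=C(n,n-k)
def pyComb (n k : Int) : Int :=
  let n' := n.toNat
  let k' := k.toNat
  if n' < k' then 0
  else ((n'.descFactorial (min k' (n' - k'))) / (Nat.factorial (min k' (n' - k'))) : ℕ)

def sym_module_dim_py (dim_g : Int) (weight : Int) : Int :=
  if weight = 0 then 1
  else
    let d := dim_g
    let W : Nat := weight.toNat
    let table0 : List Int := (List.replicate (W+1) (0:Int)).set 0 1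
    let table := (List.range' 1 W).foldl (fun table m =>
      (List.range (W+1)).foldl (fun nt w =>
        (List.range ((W - w)/m + 1)).foldl (fun nt k =>
          nt.set (w + k*m) (nt.getD (w + k*m) 0 + table.getD w 0 * pyComb ((k:Int) + d - 1) (d - 1))) nt)
        (List.replicate (W+1) (0:Int))) table0
    table.getD W 0

-- ===== PORT B =====
def sym_module_dim_py_alt (dim_g : Int) (weight : Int) : Int :=
  if weight ≤ 0 then (if weight = 0 then 1 else 0)
  else
    let w : Nat := weight.toNat
    let sigma := (List.range' 1 w).foldl (fun sg m =>
      (List.range' m (w/m) m).foldl (fun sg j => sg.set j (sg.getD j 0 + (m:Int))) sg)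
      (List.replicate (w+1) (0:Int))
    let a := (List.range' 1 w).foldl (fun a n =>
      a.set n (PySem.Int.floordiv
        (dim_g * ((List.range' 1 n).foldl (fun s k => s + sigma.getD k 0 * a.getD (n-k) 0) 0))
        (n:Int)))
      ((1:Int) :: List.replicate w 0)
    a.getD w 0

-- ===== PRECONDITION & SPEC =====
-- Pre_ excludes exactly the inputs where A raises: weight < 0 (IndexError on table[0] of an
-- empty table) and weight ≥ 1 with dim_g ≤ 0 (ValueError from math.comb on negative arguments).
def Pre_sym_module_dim_py (dim_g : Int) (weight : Int) : Prop :=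
  weight = 0 ∨ (1 ≤ weight ∧ 1 ≤ dim_g)
instance (dim_g : Int) (weight : Int) : Decidable (Pre_sym_module_dim_py dim_g weight) := by
  unfold Pre_sym_module_dim_py; infer_instance
def pvWitness_sym_module_dim_py : Int × Int := (2, 5)

def Spec_sym_module_dim_py (dim_g : Int) (weight : Int) (out : Int) : Prop :=
  out = sym_module_dim_py_alt dim_g weight
instance (dim_g : Int) (weight : Int) (out : Int) : Decidable (Spec_sym_module_dim_py dim_g weight out) := by
  unfold Spec_sym_module_dim_py; infer_instance

-- ===== CLAIM (what is proved, stated in full; the proofs are below) =====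
def Claim_equal_sym_module_dim_py : Prop := ∀ (dim_g : Int) (weight : Int), Dom_sym_module_dim_py dim_g weight → Pre_sym_module_dim_py dim_g weight → Spec_sym_module_dim_py dim_g weight (sym_module_dim_py dim_g weight)
-- ===== LEMMAS AND PROOFS =====
-- Both ports are proved equal to the coefficient of q^weight in the truncated product
-- prod_{m=1}^{weight} 1/(1-q^m)^dim_g, modelled in PowerSeries ℤ; the bridge between the
-- two algorithms is the logarithmic-derivative identity pvDer_F (Leibniz rule + the
-- single-factor identity pvDer_G), read off coefficientwise as the Euler recurrence pv_key_rec.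

def pvGc (D m n : ℕ) : ℤ := if m ∣ n then ((n / m + D - 1).choose (D - 1) : ℤ) else 0
noncomputable def pvG (D m : ℕ) : PowerSeries ℤ := PowerSeries.mk (pvGc D m)
def pvHc (D m k : ℕ) : ℤ := if m ∣ k ∧ k ≠ 0 then ((D : ℤ) * m) else 0
noncomputable def pvH (D m : ℕ) : PowerSeries ℤ := PowerSeries.mk (pvHc D m)

noncomputable def pvF (D : ℕ) : ℕ → PowerSeries ℤ
  | 0 => 1
  | (M+1) => pvF D M * pvG D (M+1)

noncomputable def pvDer (f : PowerSeries ℤ) : PowerSeries ℤ :=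
  PowerSeries.mk (fun n => (n : ℤ) * PowerSeries.coeff n f)

noncomputable def pvS (D M : ℕ) : PowerSeries ℤ := ∑ m ∈ Finset.Icc 1 M, pvH D m

lemma pvDer_mul (f g : PowerSeries ℤ) : pvDer (f*g) = pvDer f * g + f * pvDer g := by
  ext n
  simp only [pvDer, PowerSeries.coeff_mk, PowerSeries.coeff_mul, map_add, Finset.mul_sum]
  rw [← Finset.sum_add_distrib]
  refine Finset.sum_congr rfl ?_
  intro p hp
  have h := Finset.mem_antidiagonal.mp hp
  rw [← h]
  push_cast
  ring

lemma pv_hockey (e K : ℕ) :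
    ∑ i ∈ Finset.range K, (((i + e).choose e : ℤ)) = (((K + e).choose (e+1) : ℕ) : ℤ) := by
  induction K with
  | zero => simp
  | succ K ih =>
      rw [Finset.sum_range_succ, ih]
      have h := Nat.choose_succ_succ (K + e) e
      have h2 : K + 1 + e = K + e + 1 := by omega
      rw [h2]
      push_cast [h]
      ring

lemma pv_choose_id (e K : ℕ) :
    (K : ℤ) * (((K + e).choose e : ℕ) : ℤ) = ((e:ℤ)+1) * (((K + e).choose (e+1) : ℕ) : ℤ) := by
  have h := Nat.choose_succ_right_eq (K + e) e
  have h3 : K + e - e = K := by omega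
  rw [h3] at h
  have := congrArg (Nat.cast : ℕ → ℤ) h
  push_cast at this
  linarith

lemma pvDer_G (D m : ℕ) (hD : 1 ≤ D) (hm : 1 ≤ m) : pvDer (pvG D m) = pvH D m * pvG D m := by
  obtain ⟨e, rfl⟩ : ∃ e, D = e + 1 := ⟨D - 1, by omega⟩
  ext n
  rw [PowerSeries.coeff_mul, Finset.Nat.sum_antidiagonal_eq_sum_range_succ_mk]
  simp only [pvDer, pvG, pvH, PowerSeries.coeff_mk]
  by_cases hdvd : m ∣ n
  · obtain ⟨K, hK⟩ := hdvd
    have hmK : n = K * m := hK.trans (Nat.mul_comm m K)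
    have hKdiv : n / m = K := by rw [hK, Nat.mul_div_cancel_left K (by omega : 0 < m)]
    have himg : ((Finset.range (K+1)).image (fun j => j*m)) ⊆ Finset.range (n+1) := by
      intro x hx
      simp only [Finset.mem_image, Finset.mem_range] at hx ⊢
      obtain ⟨j, hj, rfl⟩ := hx
      have : j * m ≤ K * m := Nat.mul_le_mul_right m (by omega)
      omega
    have hzero : ∀ x ∈ Finset.range (n+1), x ∉ (Finset.range (K+1)).image (fun j => j*m) →
        pvHc (e+1) m x * pvGc (e+1) m (n - x) = 0 := by
      intro x hx hnx
      simp only [Finset.mem_range] at hx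
      by_cases hmx : m ∣ x
      · obtain ⟨j, rfl⟩ := hmx
        exfalso
        apply hnx
        simp only [Finset.mem_image, Finset.mem_range]
        refine ⟨j, ?_, Nat.mul_comm j m⟩
        have hle : j * m ≤ K * m := by rw [← Nat.mul_comm m j, ← hmK]; omega
        have := Nat.le_of_mul_le_mul_right hle (by omega : 0 < m)
        omega
      · simp [pvHc, hmx]
    rw [Nat.succ_eq_add_one, ← Finset.sum_subset himg hzero]
    rw [Finset.sum_image (by intro a _ b _ h; exact Nat.eq_of_mul_eq_mul_right (by omega) h)]
    have hterm : ∀ j ∈ Finset.range (K+1),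
        pvHc (e+1) m (j*m) * pvGc (e+1) m (n - j*m)
          = if j = 0 then 0 else ((e:ℤ)+1) * m * (((K - j + e).choose e : ℕ) : ℤ) := by
      intro j hj
      by_cases hj0 : j = 0
      · subst hj0; simp [pvHc]
      · have hsub : n - j*m = (K - j) * m := by rw [hmK, ← Nat.sub_mul]
        have hdvd1 : m ∣ j * m := Dvd.intro_left j rfl
        have hne : j * m ≠ 0 := by
          have : 1 * 1 ≤ j * m := Nat.mul_le_mul (by omega) (by omega)
          omega
        have hdvd2 : m ∣ (K - j) * m := Dvd.intro_left (K - j) rfl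
        rw [hsub]
        simp only [pvHc, pvGc]
        rw [if_pos (And.intro hdvd1 hne), if_pos hdvd2, if_neg hj0]
        have hq : (K - j) * m / m = K - j := Nat.mul_div_cancel _ (by omega : 0 < m)
        rw [hq]
        have hidx : K - j + (e + 1) - 1 = K - j + e := by omega
        rw [hidx]
        push_cast
        ring
    rw [Finset.sum_congr rfl hterm]
    rw [Finset.sum_range_succ']
    simp only [if_neg (Nat.succ_ne_zero _)]
    have hidx2 : ∀ i, K - (i + 1) + e = (K - 1 - i) + e := by intro i; omega
    rw [Finset.sum_congr rfl (fun i _ => by rw [hidx2 i])]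
    rw [Finset.sum_range_reflect (fun x => ((e:ℤ)+1) * m * (((x + e).choose e : ℕ) : ℤ)) K]
    have hGn : pvGc (e+1) m n = (((K + e).choose e : ℕ) : ℤ) := by
      simp only [pvGc]
      rw [if_pos ⟨K, hK⟩, hKdiv]
      have : K + (e + 1) - 1 = K + e := by omega
      rw [this]
      have : e + 1 - 1 = e := by omega
      rw [this]
    rw [hGn, ← Finset.mul_sum, pv_hockey e K, hmK]
    push_cast
    linear_combination (m : ℤ) * pv_choose_id e K
  · simp only [pvGc, hdvd, if_false, mul_zero]
    rw [Finset.sum_eq_zero]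
    intro k hk
    simp only [Finset.mem_range] at hk
    by_cases h1 : m ∣ k ∧ k ≠ 0
    · have hnk : ¬ m ∣ (n - k) := by
        intro hc
        exact hdvd (by
          have hkn : k ≤ n := by omega
          have := Nat.dvd_add hc h1.1
          rwa [Nat.sub_add_cancel hkn] at this)
      simp [pvHc, h1, hnk]
    · simp [pvHc, h1]

lemma pvDer_F (D : ℕ) (hD : 1 ≤ D) : ∀ M, pvDer (pvF D M) = pvS D M * pvF D M := by
  intro M
  induction M with
  | zero =>
      show pvDer 1 = pvS D 0 * 1
      have h1 : pvDer 1 = 0 := by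
        ext n
        simp only [pvDer, PowerSeries.coeff_mk, PowerSeries.coeff_one, map_zero]
        by_cases hn : n = 0 <;> simp [hn]
      rw [h1]
      have : pvS D 0 = 0 := by simp [pvS]
      rw [this, zero_mul]
  | succ M ih =>
      show pvDer (pvF D M * pvG D (M+1)) = pvS D (M+1) * (pvF D M * pvG D (M+1))
      rw [pvDer_mul, ih, pvDer_G D (M+1) hD (by omega)]
      have : pvS D (M+1) = pvS D M + pvH D (M+1) := by
        simp only [pvS]
        rw [Finset.sum_Icc_succ_top (by omega : 1 ≤ M + 1)]
      rw [this]
      ring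

def pvSigZ (k : ℕ) : ℤ := ∑ m ∈ Finset.Icc 1 k, if m ∣ k then (m : ℤ) else 0

lemma pvS_coeff (D M k : ℕ) (h1 : 1 ≤ k) (hk : k ≤ M) :
    PowerSeries.coeff k (pvS D M) = (D : ℤ) * pvSigZ k := by
  simp only [pvS, map_sum, pvH, PowerSeries.coeff_mk]
  rw [pvSigZ, Finset.mul_sum]
  rw [← Finset.sum_subset (Finset.Icc_subset_Icc_right hk)]
  · refine Finset.sum_congr rfl ?_
    intro m hm
    simp only [pvHc, ne_eq]
    by_cases hd : m ∣ k
    · rw [if_pos ⟨hd, by omega⟩, if_pos hd]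
    · simp [hd]
  · intro m hm hnm
    simp only [Finset.mem_Icc] at hm hnm
    have : ¬ m ∣ k := by
      intro hc
      have := Nat.le_of_dvd (by omega) hc
      omega
    simp [pvHc, this]

lemma pvF_coeff_zero (D : ℕ) : ∀ M, PowerSeries.coeff 0 (pvF D M) = 1 := by
  intro M
  induction M with
  | zero => simp [pvF]
  | succ M ih =>
      show PowerSeries.coeff 0 (pvF D M * pvG D (M+1)) = 1
      rw [PowerSeries.coeff_mul]
      simp [ih, pvG, pvGc, PowerSeries.coeff_mk]

-- the Euler-transform recurrence for the coefficients of pvF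
lemma pv_key_rec (D : ℕ) (hD : 1 ≤ D) (M n : ℕ) (h1 : 1 ≤ n) (hn : n ≤ M) :
    (n : ℤ) * PowerSeries.coeff n (pvF D M)
      = ∑ i ∈ Finset.range n, (D : ℤ) * pvSigZ (1+i) * PowerSeries.coeff (n - (1+i)) (pvF D M) := by
  have h := congrArg (fun f => PowerSeries.coeff n f) (pvDer_F D hD M)
  simp only [pvDer, PowerSeries.coeff_mk] at h
  rw [h, PowerSeries.coeff_mul, Finset.Nat.sum_antidiagonal_eq_sum_range_succ_mk]
  rw [Nat.succ_eq_add_one, Finset.sum_range_succ']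
  have hz : PowerSeries.coeff 0 (pvS D M) = 0 := by
    simp [pvS, map_sum, pvH, PowerSeries.coeff_mk, pvHc]
  rw [hz, zero_mul, add_zero]
  refine Finset.sum_congr rfl ?_
  intro i hi
  simp only [Finset.mem_range] at hi
  have h1i : i + 1 = 1 + i := by omega
  rw [pvS_coeff D M (i+1) (by omega) (by omega), h1i]

-- ===== generic list-scatter layer =====
def pvUpd (t : List Int) (p : ℕ × ℤ) : List Int := t.set p.1 (t.getD p.1 0 + p.2)

lemma pv_getD_set_self (t : List Int) (i : ℕ) (x : Int) (h : i < t.length) :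
    (t.set i x).getD i 0 = x := by
  simp [List.getD_eq_getElem?_getD, List.getElem?_set, h]

lemma pv_getD_set_ne (t : List Int) (i : ℕ) (x : Int) (v : ℕ) (h : i ≠ v) :
    (t.set i x).getD v 0 = t.getD v 0 := by
  simp [List.getD_eq_getElem?_getD, List.getElem?_set, h]

lemma pv_getD_replicate (n v : ℕ) : (List.replicate n (0:Int)).getD v 0 = 0 := by
  simp only [List.getD_eq_getElem?_getD, List.getElem?_replicate]
  by_cases h : v < n <;> simp [h]

lemma pv_scatter_length (ps : List (ℕ × ℤ)) (t : List Int) :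
    (ps.foldl pvUpd t).length = t.length := by
  induction ps generalizing t with
  | nil => rfl
  | cons p ps ih => simp [List.foldl_cons, ih, pvUpd]

lemma pv_scatter_getD (ps : List (ℕ × ℤ)) (t : List Int)
    (h : ∀ p ∈ ps, p.1 < t.length) (v : ℕ) :
    (ps.foldl pvUpd t).getD v 0
      = t.getD v 0 + (ps.map (fun p => if p.1 = v then p.2 else 0)).sum := by
  induction ps generalizing t with
  | nil => simp
  | cons p ps ih =>
      simp only [List.foldl_cons, List.map_cons, List.sum_cons]
      rw [ih _ (by intro q hq; rw [pvUpd, List.length_set]; exact h q (List.mem_cons_of_mem p hq))]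
      by_cases hv : p.1 = v
      · subst hv
        rw [if_pos rfl, pvUpd, pv_getD_set_self t p.1 _ (h p (List.mem_cons_self))]
        ring
      · rw [if_neg hv, pvUpd, pv_getD_set_ne t p.1 _ v hv]
        ring

lemma pv_foldl_flatMap {α β γ : Type} (l : List α) (g : α → List β) (f : γ → β → γ) (i : γ) :
    (l.flatMap g).foldl f i = l.foldl (fun a x => (g x).foldl f a) i := by
  induction l generalizing i with
  | nil => rfl
  | cons x l ih => simp [List.flatMap_cons, List.foldl_append, ih]

lemma pv_sum_map_range (n : ℕ) (f : ℕ → ℤ) :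
    ((List.range n).map f).sum = ∑ i ∈ Finset.range n, f i := by
  induction n with
  | zero => rfl
  | succ n ih => rw [List.range_succ, List.map_append, List.sum_append, Finset.sum_range_succ, ih]; simp

lemma pv_sum_map_range' (s n step : ℕ) (f : ℕ → ℤ) :
    ((List.range' s n step).map f).sum = ∑ i ∈ Finset.range n, f (s + step*i) := by
  induction n with
  | zero => rfl
  | succ n ih => rw [List.range'_concat, List.map_append, List.sum_append, Finset.sum_range_succ, ih]; simp

lemma pv_sum_Icc_one (n : ℕ) (f : ℕ → ℤ) :
    ∑ m ∈ Finset.Icc 1 n, f m = ∑ i ∈ Finset.range n, f (1+i) := by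
  induction n with
  | zero => rfl
  | succ n ih =>
      rw [Finset.sum_Icc_succ_top (by omega), Finset.sum_range_succ, ih]
      have h1 : n + 1 = 1 + n := by omega
      rw [h1]

lemma pv_foldl_range'_inv {γ : Type} (P : ℕ → γ → Prop) (f : γ → ℕ → γ) (n : ℕ) (init : γ)
    (h0 : P 0 init) (hs : ∀ j acc, j < n → P j acc → P (j+1) (f acc (1+j))) :
    P n ((List.range' 1 n).foldl f init) := by
  induction n with
  | zero => exact h0
  | succ n ih =>
      rw [List.range'_concat]
      rw [List.foldl_append, List.foldl_cons, List.foldl_nil]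
      have h1 : (1 : ℕ) + 1 * n = 1 + n := by omega
      rw [h1]
      exact hs n _ (by omega) (ih (fun j acc hj => hs j acc (by omega)))

lemma pv_sum_map_flatMap {α β : Type} (l : List α) (g : α → List β) (φ : β → ℤ) :
    ((l.flatMap g).map φ).sum = (l.map (fun x => ((g x).map φ).sum)).sum := by
  induction l with
  | nil => rfl
  | cons x l ih => simp [List.flatMap_cons, List.map_append, List.sum_append, ih]

-- one pass of A's loop: multiply the truncated series in `tbl` by pvG D m
lemma pv_A_inner (D m W : ℕ) (hm : 1 ≤ m) (φ : PowerSeries ℤ) (tbl : List Int)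
    (hlen : tbl.length = W+1) (htbl : ∀ u, u ≤ W → tbl.getD u 0 = PowerSeries.coeff u φ) :
    ((List.range (W+1)).foldl (fun nt w =>
        (List.range ((W - w)/m + 1)).foldl
          (fun nt k => nt.set (w + k*m)
            (nt.getD (w + k*m) 0 + tbl.getD w 0 * (((k + D - 1).choose (D - 1) : ℕ) : ℤ))) nt)
      (List.replicate (W+1) (0:Int))).length = W+1 ∧
    ∀ v, v ≤ W →
    ((List.range (W+1)).foldl (fun nt w =>
        (List.range ((W - w)/m + 1)).foldl
          (fun nt k => nt.set (w + k*m)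
            (nt.getD (w + k*m) 0 + tbl.getD w 0 * (((k + D - 1).choose (D - 1) : ℕ) : ℤ))) nt)
      (List.replicate (W+1) (0:Int))).getD v 0
    = PowerSeries.coeff v (φ * pvG D m) := by
  -- rewrite the nested loops as one scatter over a flat list of (index, contribution) pairs
  have hstep : (fun (nt : List Int) (w : ℕ) =>
        (List.range ((W - w)/m + 1)).foldl
          (fun nt k => nt.set (w + k*m)
            (nt.getD (w + k*m) 0 + tbl.getD w 0 * (((k + D - 1).choose (D - 1) : ℕ) : ℤ))) nt)
      = (fun nt w =>
        (((List.range ((W - w)/m + 1)).map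
            (fun k => (w + k*m, tbl.getD w 0 * (((k + D - 1).choose (D - 1) : ℕ) : ℤ)))).foldl pvUpd nt)) := by
    funext nt w
    rw [List.foldl_map]
    rfl
  rw [hstep, ← pv_foldl_flatMap]
  have hbound : ∀ p ∈ (List.range (W+1)).flatMap (fun w => (List.range ((W - w)/m + 1)).map
        (fun k => (w + k*m, tbl.getD w 0 * (((k + D - 1).choose (D - 1) : ℕ) : ℤ)))),
      p.1 < (List.replicate (W+1) (0:Int)).length := by
    intro p hp
    simp only [List.mem_flatMap, List.mem_map, List.mem_range] at hp
    obtain ⟨w, hw, k, hk, rfl⟩ := hp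
    simp only [List.length_replicate]
    have : k * m ≤ W - w := by
      calc k * m ≤ ((W - w)/m) * m := Nat.mul_le_mul_right m (by omega)
      _ ≤ W - w := Nat.div_mul_le_self _ _
    omega
  refine ⟨by rw [pv_scatter_length]; simp, ?_⟩
  intro v hv
  rw [pv_scatter_getD _ _ hbound v]
  · rw [pv_getD_replicate, zero_add]
    rw [pv_sum_map_flatMap, pv_sum_map_range]
    have hinner : ∀ w, w ∈ Finset.range (W+1) →
        (((List.range ((W - w)/m + 1)).map
            (fun k => (w + k*m, tbl.getD w 0 * (((k + D - 1).choose (D - 1) : ℕ) : ℤ)))).map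
          (fun p => if p.1 = v then p.2 else 0)).sum
        = if w ≤ v then tbl.getD w 0 * pvGc D m (v - w) else 0 := by
      intro w _
      rw [List.map_map, pv_sum_map_range]
      simp only [Function.comp_def]
      by_cases hwv : w ≤ v ∧ m ∣ (v - w)
      · obtain ⟨hwle, hdvd⟩ := hwv
        have hk0 : (v - w)/m * m = v - w := Nat.div_mul_cancel hdvd
        have hiff : ∀ k, (w + k*m = v) ↔ (k = (v - w)/m) := by
          intro k
          constructor
          · intro h
            have : k * m = (v - w)/m * m := by omega
            exact Nat.eq_of_mul_eq_mul_right (by omega) this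
          · intro h; subst h; omega
        have hcongr : ∀ k ∈ Finset.range ((W - w)/m + 1),
            (fun p : ℕ × ℤ => if p.1 = v then p.2 else 0)
              ((fun k => (w + k*m, tbl.getD w 0 * (((k + D - 1).choose (D - 1) : ℕ) : ℤ))) k)
            = (if k = (v - w)/m then tbl.getD w 0 * (((k + D - 1).choose (D - 1) : ℕ) : ℤ) else 0) := by
          intro k _
          beta_reduce
          rw [if_congr (hiff k) rfl rfl]
        rw [Finset.sum_congr rfl hcongr, Finset.sum_ite_eq']
        rw [if_pos (by
          simp only [Finset.mem_range]
          have : (v - w)/m ≤ (W - w)/m := Nat.div_le_div_right (by omega)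
          omega)]
        rw [if_pos hwle]
        simp only [pvGc, if_pos hdvd]
      · rw [Finset.sum_eq_zero, eq_comm]
        · by_cases hwle : w ≤ v
          · have hnd : ¬ m ∣ (v - w) := fun hc => hwv ⟨hwle, hc⟩
            rw [if_pos hwle]
            simp [pvGc, hnd]
          · rw [if_neg hwle]
        · intro k _
          beta_reduce
          rw [if_neg (by
            intro hc
            apply hwv
            refine ⟨by omega, ?_⟩
            have : k * m = v - w := by omega
            exact this ▸ Dvd.intro_left k rfl)]
    rw [Finset.sum_congr rfl hinner]
    rw [← Finset.sum_subset (by intro x hx; simp only [Finset.mem_range] at hx ⊢; omega : Finset.range (v+1) ⊆ Finset.range (W+1))]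
    · rw [PowerSeries.coeff_mul, Finset.Nat.sum_antidiagonal_eq_sum_range_succ_mk]
      refine Finset.sum_congr rfl ?_
      intro w hw
      simp only [Finset.mem_range] at hw
      rw [if_pos (by omega : w ≤ v), htbl w (by omega)]
      simp [pvG, PowerSeries.coeff_mk]
    · intro w hw hnw
      simp only [Finset.mem_range] at hw hnw
      rw [if_neg (by omega)]

lemma pv_pyComb_choose (n k : Int) : pyComb n k = (n.toNat.choose k.toNat : ℤ) := by
  unfold pyComb
  set n' := n.toNat
  set k' := k.toNat
  by_cases h : n' < k'
  · rw [if_pos h, Nat.choose_eq_zero_of_lt h]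
    rfl
  · rw [if_neg h]
    by_cases h2 : k' ≤ n' - k'
    · rw [min_eq_left h2, ← Nat.choose_eq_descFactorial_div_factorial]
    · rw [min_eq_right (by omega), ← Nat.choose_eq_descFactorial_div_factorial]
      rw [Nat.choose_symm (by omega)]

lemma pv_pyComb_eq (D k : ℕ) (hD : 1 ≤ D) :
    (((k : ℤ) + (D : ℤ) - 1).toNat.choose ((D : ℤ) - 1).toNat : ℤ)
      = (((k + D - 1).choose (D - 1) : ℕ) : ℤ) := by
  have h1 : ((k : ℤ) + (D : ℤ) - 1).toNat = k + D - 1 := by omega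
  have h2 : ((D : ℤ) - 1).toNat = D - 1 := by omega
  rw [h1, h2]

lemma pv_A_eq (D W : ℕ) (hD : 1 ≤ D) (hW : 1 ≤ W) :
    sym_module_dim_py (D : ℤ) (W : ℤ) = PowerSeries.coeff W (pvF D W) := by
  rw [sym_module_dim_py]
  rw [if_neg (by exact_mod_cast (by omega : (W:ℤ) ≠ 0))]
  simp only [Int.toNat_natCast]
  have hcomb : ∀ (tbl : List Int) (w k : ℕ),
      tbl.getD w 0 * pyComb ((k:Int) + (D:ℤ) - 1) ((D:ℤ) - 1)
        = tbl.getD w 0 * (((k + D - 1).choose (D - 1) : ℕ) : ℤ) := by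
    intro tbl w k
    rw [pv_pyComb_choose, pv_pyComb_eq D k hD]
  have hmain : ∀ (t : List Int),
      ((List.range' 1 W).foldl (fun table m =>
        (List.range (W+1)).foldl (fun nt w =>
          (List.range ((W - w)/m + 1)).foldl
            (fun nt k => nt.set (w + k*m)
              (nt.getD (w + k*m) 0 + table.getD w 0 * pyComb ((k:Int) + (D:ℤ) - 1) ((D:ℤ) - 1))) nt)
          (List.replicate (W+1) (0:Int))) t)
      = ((List.range' 1 W).foldl (fun table m =>
        (List.range (W+1)).foldl (fun nt w =>
          (List.range ((W - w)/m + 1)).foldl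
            (fun nt k => nt.set (w + k*m)
              (nt.getD (w + k*m) 0 + table.getD w 0 * (((k + D - 1).choose (D - 1) : ℕ) : ℤ))) nt)
          (List.replicate (W+1) (0:Int))) t) := by
    intro t
    congr 1
    funext table m
    congr 1
    funext nt w
    congr 1
    funext nt k
    rw [hcomb]
  rw [hmain]
  have hinv := pv_foldl_range'_inv
    (fun j t => t.length = W+1 ∧ ∀ v, v ≤ W → t.getD v 0 = PowerSeries.coeff v (pvF D j))
    (fun table m =>
        (List.range (W+1)).foldl (fun nt w =>
          (List.range ((W - w)/m + 1)).foldl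
            (fun nt k => nt.set (w + k*m)
              (nt.getD (w + k*m) 0 + table.getD w 0 * (((k + D - 1).choose (D - 1) : ℕ) : ℤ))) nt)
          (List.replicate (W+1) (0:Int)))
    W
    ((List.replicate (W+1) (0:Int)).set 0 1)
    (by
      constructor
      · simp
      · intro v hv
        show _ = PowerSeries.coeff v 1
        rw [PowerSeries.coeff_one]
        by_cases h0 : v = 0
        · subst h0
          rw [pv_getD_set_self _ 0 1 (by simp), if_pos rfl]
        · rw [pv_getD_set_ne _ 0 1 v (by omega), if_neg h0, pv_getD_replicate])
    (by
      intro j acc hj hPj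
      obtain ⟨hlen, hacc⟩ := hPj
      have h := pv_A_inner D (j+1) W (by omega) (pvF D j) acc hlen hacc
      beta_reduce
      rw [show (1:ℕ)+j = j+1 from by omega]
      exact ⟨h.1, fun v hv => h.2 v hv⟩)
  exact hinv.2 W (le_refl W)

-- B's sieve computes the divisor sums pvSigZ
lemma pv_B_sigma (w : ℕ) :
    ((List.range' 1 w).foldl (fun sg m =>
        (List.range' m (w/m) m).foldl (fun sg j => sg.set j (sg.getD j 0 + (m:Int))) sg)
      (List.replicate (w+1) (0:Int))).length = w+1 ∧
    ∀ v, 1 ≤ v → v ≤ w →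
    ((List.range' 1 w).foldl (fun sg m =>
        (List.range' m (w/m) m).foldl (fun sg j => sg.set j (sg.getD j 0 + (m:Int))) sg)
      (List.replicate (w+1) (0:Int))).getD v 0 = pvSigZ v := by
  have hstep : (fun (sg : List Int) (m : ℕ) =>
        (List.range' m (w/m) m).foldl (fun sg j => sg.set j (sg.getD j 0 + (m:Int))) sg)
      = (fun sg m => (((List.range' m (w/m) m).map (fun j => (j, (m:ℤ)))).foldl pvUpd sg)) := by
    funext sg m
    rw [List.foldl_map]
    rfl
  rw [hstep, ← pv_foldl_flatMap]
  have hbound : ∀ p ∈ (List.range' 1 w).flatMap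
        (fun m => (List.range' m (w/m) m).map (fun j => (j, (m:ℤ)))),
      p.1 < (List.replicate (w+1) (0:Int)).length := by
    intro p hp
    simp only [List.mem_flatMap, List.mem_map, List.mem_range'] at hp
    obtain ⟨m, hm, j, hj, rfl⟩ := hp
    obtain ⟨i, hi, rfl⟩ := hj
    simp only [List.length_replicate]
    have : m + m * i = m * (i+1) := by ring
    have h2 : m * (i+1) ≤ m * (w/m) := Nat.mul_le_mul_left m (by omega)
    have h3 : m * (w/m) ≤ w := Nat.mul_div_le w m
    omega
  refine ⟨by rw [pv_scatter_length]; simp, ?_⟩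
  intro v hv1 hvw
  rw [pv_scatter_getD _ _ hbound v, pv_getD_replicate, zero_add]
  rw [pv_sum_map_flatMap, pv_sum_map_range' 1 w 1]
  have hinner : ∀ i, i ∈ Finset.range w →
      (((List.range' (1+1*i) (w/(1+1*i)) (1+1*i)).map (fun j => (j, ((1+1*i : ℕ):ℤ)))).map
          (fun p => if p.1 = v then p.2 else 0)).sum
      = if (1+1*i) ∣ v ∧ (1+1*i) ≤ v then ((1+1*i : ℕ):ℤ) else 0 := by
    intro i _
    set m := 1 + 1*i with hm
    have hm1 : 1 ≤ m := by omega
    rw [List.map_map, pv_sum_map_range' m (w/m) m]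
    simp only [Function.comp_def]
    by_cases hc : m ∣ v ∧ m ≤ v
    · obtain ⟨hdvd, hle⟩ := hc
      have hq : m * (v/m) = v := Nat.mul_div_cancel' hdvd
      have hq1 : 1 ≤ v/m := by
        rcases Nat.eq_zero_or_pos (v/m) with h | h
        · rw [h, Nat.mul_zero] at hq; omega
        · omega
      have hiff : ∀ i2, (m + m*i2 = v) ↔ (i2 = v/m - 1) := by
        intro i2
        constructor
        · intro h
          have : m * (i2+1) = m * (v/m) := by rw [hq]; ring_nf; omega
          have := Nat.eq_of_mul_eq_mul_left (by omega : 0 < m) this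
          omega
        · intro h
          subst h
          have : m * (v/m - 1 + 1) = m * (v/m) := by congr 1; omega
          have h2 : m + m * (v/m - 1) = m * (v/m - 1 + 1) := by ring
          omega
      have hcongr : ∀ i2 ∈ Finset.range (w/m),
          (if m + m*i2 = v then ((m:ℕ):ℤ) else 0)
            = (if i2 = v/m - 1 then ((m:ℕ):ℤ) else 0) := by
        intro i2 _
        rw [if_congr (hiff i2) rfl rfl]
      calc (∑ i2 ∈ Finset.range (w/m), if m + m*i2 = v then ((m:ℕ):ℤ) else 0)
          = ∑ i2 ∈ Finset.range (w/m), if i2 = v/m - 1 then ((m:ℕ):ℤ) else 0 :=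
            Finset.sum_congr rfl hcongr
        _ = if v/m - 1 ∈ Finset.range (w/m) then ((m:ℕ):ℤ) else 0 := Finset.sum_ite_eq' _ _ _
        _ = ((m:ℕ):ℤ) := by
            rw [if_pos]
            simp only [Finset.mem_range]
            have : v/m ≤ w/m := Nat.div_le_div_right hvw
            omega
        _ = if m ∣ v ∧ m ≤ v then ((m:ℕ):ℤ) else 0 := by rw [if_pos ⟨hdvd, hle⟩]
    · rw [if_neg hc, Finset.sum_eq_zero]
      intro i2 _
      rw [if_neg]
      intro h
      apply hc
      constructor
      · have : m * (i2 + 1) = v := by ring_nf; omega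
        exact Dvd.intro _ this
      · omega
  rw [Finset.sum_congr rfl hinner, pvSigZ, pv_sum_Icc_one]
  rw [← Finset.sum_subset (by
      intro x hx
      simp only [Finset.mem_range] at hx ⊢
      omega : Finset.range v ⊆ Finset.range w)]
  · refine Finset.sum_congr rfl ?_
    intro i hi
    simp only [Finset.mem_range] at hi
    have h1 : (1 + 1*i) = 1 + i := by omega
    rw [h1]
    by_cases hd : (1+i) ∣ v
    · rw [if_pos ⟨hd, by omega⟩, if_pos hd]
    · rw [if_neg (by tauto), if_neg hd]
  · intro i hi hni
    simp only [Finset.mem_range] at hi hni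
    rw [if_neg]
    intro hc
    have := hc.2
    omega

lemma pv_B_eq (D w : ℕ) (hD : 1 ≤ D) (hw : 1 ≤ w) :
    sym_module_dim_py_alt (D:ℤ) (w:ℤ) = PowerSeries.coeff w (pvF D w) := by
  rw [sym_module_dim_py_alt, if_neg (by exact_mod_cast (by omega : ¬ (w:ℤ) ≤ 0))]
  simp only [Int.toNat_natCast]
  obtain ⟨hslen, hsig⟩ := pv_B_sigma w
  set sigma := ((List.range' 1 w).foldl (fun sg m =>
      (List.range' m (w/m) m).foldl (fun sg j => sg.set j (sg.getD j 0 + (m:Int))) sg)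
    (List.replicate (w+1) (0:Int))) with hsigdef
  have hinv := pv_foldl_range'_inv
    (fun j a => a.length = w+1 ∧ ∀ v, v ≤ j → a.getD v 0 = PowerSeries.coeff v (pvF D w))
    (fun a n =>
      a.set n (PySem.Int.floordiv
        ((D:ℤ) * ((List.range' 1 n).foldl (fun s k => s + sigma.getD k 0 * a.getD (n-k) 0) 0))
        (n:Int)))
    w
    ((1:Int) :: List.replicate w 0)
    (by
      refine ⟨by simp, ?_⟩
      intro v hv
      have hv0 : v = 0 := by omega
      subst hv0
      show (1:ℤ) = _
      rw [pvF_coeff_zero])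
    (by
      intro j acc hj hPj
      obtain ⟨hlen, hacc⟩ := hPj
      beta_reduce
      have hs : ((List.range' 1 (1+j)).foldl
          (fun s k => s + sigma.getD k 0 * acc.getD ((1+j)-k) 0) 0)
          = ∑ i ∈ Finset.range (1+j), pvSigZ (1+i) * PowerSeries.coeff ((1+j) - (1+i)) (pvF D w) := by
        rw [PySem.List.foldl_add (List.range' 1 (1+j)) (fun k => sigma.getD k 0 * acc.getD ((1+j)-k) 0) 0]
        rw [zero_add, pv_sum_map_range' 1 (1+j) 1]
        refine Finset.sum_congr rfl ?_
        intro i hi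
        simp only [Finset.mem_range] at hi
        have h1 : 1 + 1*i = 1 + i := by omega
        rw [h1]
        rw [hsig (1+i) (by omega) (by omega)]
        rw [hacc ((1+j)-(1+i)) (by omega)]
      rw [hs]
      have hrec := pv_key_rec D hD w (1+j) (by omega) (by omega)
      have hDs : (D:ℤ) * (∑ i ∈ Finset.range (1+j), pvSigZ (1+i) * PowerSeries.coeff ((1+j) - (1+i)) (pvF D w))
          = ((1+j : ℕ) : ℤ) * PowerSeries.coeff (1+j) (pvF D w) := by
        rw [hrec, Finset.mul_sum]
        refine Finset.sum_congr rfl ?_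
        intro i _
        ring
      rw [hDs]
      have hdivpos : (0:ℤ) < ((1+j : ℕ) : ℤ) := by positivity
      rw [PySem.Int.floordiv_eq_ediv_of_pos hdivpos]
      rw [Int.mul_ediv_cancel_left _ (by omega)]
      refine ⟨by rw [List.length_set]; exact hlen, ?_⟩
      intro v hv
      by_cases hvj : v = 1+j
      · subst hvj
        rw [pv_getD_set_self _ _ _ (by omega)]
      · rw [pv_getD_set_ne _ _ _ _ (by omega)]
        exact hacc v (by omega))
  exact hinv.2 w (le_refl w)

-- ===== VERDICT (by name: the statement is the Claim_ definition above) =====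
theorem sym_module_dim_py_spec : Claim_equal_sym_module_dim_py := by
  intro dim_g weight _ hpre
  unfold Spec_sym_module_dim_py
  rcases hpre with h0 | ⟨hw, hd⟩
  · subst h0
    simp [sym_module_dim_py, sym_module_dim_py_alt]
  · obtain ⟨D, rfl⟩ : ∃ D : ℕ, dim_g = (D:ℤ) := ⟨dim_g.toNat, by omega⟩
    obtain ⟨w, rfl⟩ : ∃ w : ℕ, weight = (w:ℤ) := ⟨weight.toNat, by omega⟩
    have hD : 1 ≤ D := by exact_mod_cast hd
    have hw' : 1 ≤ w := by exact_mod_cast hw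
    rw [pv_A_eq D w hD hw', pv_B_eq D w hD hw']
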